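-- pv_equiv track=rewrite | github.com/leiacf/AoC2025 | src/06.py | parse
-- ===== SOURCE A (Python) =====
-- def parse(input):
--
--     math = []
--     params = []
--
--     for line in input:
--
--         split = line.split()
--
--         if "+" in line:
--             for param in split:
--                 params.append(param)
--
--         else:
--             for index, number in enumerate(split):
--                 if index < len(math):
--                     math[index].append(int(number))
--                 else:
--                     math.append([int(number)])
--
--     return math, params
-- ===== SOURCE B (Python) =====
-- def parse(input):
--     params = []
--     rows = []
--     for line in input:
--         tokens = line.split()
--         if "+" in line:
--             params.extend(tokens)
--         else:
--             rows.append(tokens)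
--     width = max((len(r) for r in rows), default=0)
--     math = [[int(r[j]) for r in rows if j < len(r)] for j in range(width)]
--     return math, params
-- ===== Notes on version B (the rewrite author's own statement) =====
-- stated objective: alternative
-- what changed: B first partitions lines into param tokens and raw token rows in one pass, then builds the transposed number matrix in a second pass by column comprehension over range(max width), instead of growing columns incrementally inside the line loop.
import Mathlib
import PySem

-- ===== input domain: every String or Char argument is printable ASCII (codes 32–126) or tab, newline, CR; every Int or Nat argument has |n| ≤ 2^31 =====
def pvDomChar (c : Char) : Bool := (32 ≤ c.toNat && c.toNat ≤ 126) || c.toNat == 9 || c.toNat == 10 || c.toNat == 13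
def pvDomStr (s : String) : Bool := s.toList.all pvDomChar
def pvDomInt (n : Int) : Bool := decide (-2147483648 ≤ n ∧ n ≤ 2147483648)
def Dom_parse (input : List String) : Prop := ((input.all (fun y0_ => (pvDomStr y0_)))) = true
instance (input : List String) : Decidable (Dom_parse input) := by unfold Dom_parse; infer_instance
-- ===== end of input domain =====

-- B separates parsing (collect param tokens and raw token rows) from transposition (column
-- comprehension over range(max width)) instead of growing columns inline; objective: alternative.

-- int(t); Pre_parse guarantees ofStr? succeeds on every token converted
def pvInt (t : String) : Int := (PySem.Int.ofStr? t).getD 0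

-- ===== PORT A =====
def stepA (st : List (List Int) × List String) (line : String) : List (List Int) × List String :=
  let split := PySem.Str.split₀ line
  if PySem.Str.isIn "+" line then
    (st.1, split.foldl (fun ps p => ps ++ [p]) st.2)
  else
    ((PySem.List.enumerate split).foldl
      (fun math (p : Int × String) =>
        if p.1 < (math.length : Int) then
          math.modify p.1.toNat (fun c => c ++ [pvInt p.2])
        else
          math ++ [[pvInt p.2]]) st.1,
     st.2)

def parse (input : List String) : List (List Int) × List String :=
  input.foldl stepA ([], [])

-- ===== PORT B =====
def stepB (st : List (List String) × List String) (line : String) :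
    List (List String) × List String :=
  let tokens := PySem.Str.split₀ line
  if PySem.Str.isIn "+" line then (st.1, st.2 ++ tokens) else (st.1 ++ [tokens], st.2)

-- width = max((len(r) for r in rows), default=0)
def pvWidth (rows : List (List String)) : Nat :=
  rows.foldl (fun m r => max m r.length) 0

-- math = [[int(r[j]) for r in rows if j < len(r)] for j in range(width)]
def pvCols (rows : List (List String)) : List (List Int) :=
  (List.range (pvWidth rows)).map
    (fun j => (rows.filter (fun r => j < r.length)).map (fun r => pvInt (r.getD j "")))

def parse_alt (input : List String) : List (List Int) × List String :=
  let st := input.foldl stepB ([], [])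
  (pvCols st.1, st.2)

-- ===== PRECONDITION & SPEC =====
-- Pre_parse excludes exactly the inputs where Python raises ValueError: a line without '+'
-- containing a token that int() rejects.
def Pre_parse (input : List String) : Prop :=
  (input.all (fun line =>
    PySem.Str.isIn "+" line ||
      (PySem.Str.split₀ line).all (fun t => (PySem.Int.ofStr? t).isSome))) = true
instance (input : List String) : Decidable (Pre_parse input) := by unfold Pre_parse; infer_instance

def pvWitness_parse : List String := ["1 2 3", "4 5", "a + b"]

def Spec_parse (input : List String) (out : List (List Int) × List String) : Prop := out = parse_alt input
instance (input : List String) (out : List (List Int) × List String) : Decidable (Spec_parse input out) := by unfold Spec_parse; infer_instance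

-- ===== CLAIM (what is proved, stated in full; the proofs are below) =====
def Claim_equal_parse : Prop := ∀ (input : List String), Dom_parse input → Pre_parse input → Spec_parse input (parse input)

-- ===== LEMMAS AND PROOFS =====

-- the inner enumerate loop of A, with a Nat index
def innerGo (math : List (List Int)) (k : Nat) (r : List String) : List (List Int) :=
  match r with
  | [] => math
  | t :: ts =>
      innerGo (if k < math.length then math.modify k (fun c => c ++ [pvInt t])
               else math ++ [[pvInt t]]) (k + 1) ts

theorem foldl_snoc_param (l : List String) (a : List String) :
    l.foldl (fun ps p => ps ++ [p]) a = a ++ l := by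
  induction l generalizing a with
  | nil => simp
  | cons x xs ih => simp [List.foldl_cons, ih]

theorem enum_fold_eq_innerGo (r : List String) (s : Nat) (math : List (List Int)) :
    (PySem.List.enumerate r (s : Int)).foldl
      (fun math (p : Int × String) =>
        if p.1 < (math.length : Int) then
          math.modify p.1.toNat (fun c => c ++ [pvInt p.2])
        else
          math ++ [[pvInt p.2]]) math = innerGo math s r := by
  induction r generalizing s math with
  | nil => simp [PySem.List.enumerate_nil, innerGo]
  | cons t ts ih =>
      rw [PySem.List.enumerate_cons, List.foldl_cons]
      simp only [innerGo]
      rw [show ((s : Int) + 1) = ((s + 1 : Nat) : Int) by push_cast; ring]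
      by_cases h : s < math.length
      · rw [if_pos (by exact_mod_cast h : (s : Int) < (math.length : Int))]
        rw [if_pos h]
        rw [show ((s : Int)).toNat = s from Int.toNat_natCast s]
        exact ih (s + 1) _
      · rw [if_neg (by exact_mod_cast h : ¬ (s : Int) < (math.length : Int))]
        rw [if_neg h]
        exact ih (s + 1) _

theorem innerGo_char (r : List String) (k : Nat) (math : List (List Int)) (hk : k ≤ math.length) :
    innerGo math k r =
      math.mapIdx (fun j c =>
        if k ≤ j ∧ j - k < r.length then c ++ [pvInt (r.getD (j - k) "")] else c)
      ++ (r.drop (math.length - k)).map (fun t => [pvInt t]) := by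
  induction r generalizing k math with
  | nil =>
      simp only [innerGo, List.length_nil, List.drop_nil, List.map_nil, List.append_nil]
      apply List.ext_getElem
      · simp
      · intro i h1 h2
        rw [List.getElem_mapIdx, if_neg (by simp)]
  | cons t ts ih =>
      simp only [innerGo]
      by_cases h : k < math.length
      · rw [if_pos h, ih (k + 1) _ (by rw [List.length_modify]; omega)]
        congr 1
        · apply List.ext_getElem
          · simp
          · intro i h1 h2
            rw [List.getElem_mapIdx, List.getElem_mapIdx, List.getElem_modify]
            have hi : i < math.length := by simpa using h2
            by_cases hik : k = i
            · subst hik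
              rw [if_pos rfl, if_neg (by omega), if_pos (by constructor <;> simp)]
              simp
            · rw [if_neg hik]
              rcases Nat.lt_or_ge i k with hlt | hge
              · rw [if_neg (by omega), if_neg (by omega)]
              · have hgt : k < i := by omega
                by_cases hc : i - (k + 1) < ts.length
                · rw [if_pos ⟨by omega, hc⟩, if_pos ⟨by omega, by simp; omega⟩]
                  have : i - k = (i - (k + 1)) + 1 := by omega
                  rw [this, List.getD_cons_succ]
                · rw [if_neg (by omega), if_neg (by simp; omega)]
        · rw [List.length_modify]
          have : math.length - k = (math.length - (k + 1)) + 1 := by omega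
          rw [this, List.drop_succ_cons]
      · have hk' : k = math.length := by omega
        rw [if_neg h, ih (k + 1) _ (by simp; omega)]
        have e1 : List.mapIdx (fun j (c : List Int) =>
            if k + 1 ≤ j ∧ j - (k + 1) < ts.length then c ++ [pvInt (ts.getD (j - (k + 1)) "")] else c) math = math := by
          apply List.ext_getElem
          · simp
          · intro i h1 h2
            have hi : i < math.length := by simpa using h2
            rw [List.getElem_mapIdx, if_neg (by omega)]
        have e2 : List.mapIdx (fun j (c : List Int) =>
            if k ≤ j ∧ j - k < (t :: ts).length then c ++ [pvInt ((t :: ts).getD (j - k) "")] else c) math = math := by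
          apply List.ext_getElem
          · simp
          · intro i h1 h2
            have hi : i < math.length := by simpa using h2
            rw [List.getElem_mapIdx, if_neg (by simp; omega)]
        rw [List.mapIdx_append, e1, e2]
        rw [List.mapIdx_cons]
        rw [if_neg (by simp; omega)]
        have hL : (math ++ [[pvInt t]]).length = k + 1 := by simp [hk']
        rw [hL, Nat.sub_self, List.drop_zero]
        rw [show math.length - k = 0 by omega, List.drop_zero]
        simp

theorem pvWidth_snoc (rows : List (List String)) (r : List String) :
    pvWidth (rows ++ [r]) = max (pvWidth rows) r.length := by
  simp [pvWidth, List.foldl_append]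

theorem len_le_pvWidth_aux (rows : List (List String)) (a : Nat) :
    a ≤ rows.foldl (fun m r => max m r.length) a := by
  induction rows generalizing a with
  | nil => simp
  | cons b bs ih => exact le_trans (le_max_left _ _) (ih (max a b.length))

theorem len_le_pvWidth_gen : ∀ (rows : List (List String)) (r : List String), r ∈ rows →
    ∀ (a : Nat), r.length ≤ rows.foldl (fun m q => max m q.length) a
  | b :: bs, r, h, a => by
      rcases List.mem_cons.mp h with h' | h'
      · subst h'
        exact le_trans (le_max_right _ _) (len_le_pvWidth_aux bs _)
      · exact len_le_pvWidth_gen bs r h' _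

theorem len_le_pvWidth (rows : List (List String)) (r : List String) (h : r ∈ rows) :
    r.length ≤ pvWidth rows := len_le_pvWidth_gen rows r h 0

theorem length_pvCols (rows : List (List String)) : (pvCols rows).length = pvWidth rows := by
  simp [pvCols]

theorem cols_snoc (rows : List (List String)) (r : List String) :
    innerGo (pvCols rows) 0 r = pvCols (rows ++ [r]) := by
  rw [innerGo_char r 0 _ (Nat.zero_le _), Nat.sub_zero]
  apply List.ext_getElem
  · simp only [List.length_append, List.length_mapIdx, List.length_map, List.length_drop,
      length_pvCols, pvWidth_snoc]
    omega
  · intro i h1 h2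
    have hW : (pvCols rows).length = pvWidth rows := length_pvCols rows
    have hi' : i < max (pvWidth rows) r.length := by
      have h2' := h2
      rw [length_pvCols, pvWidth_snoc] at h2'
      exact h2' 
    have hRHS : (pvCols (rows ++ [r]))[i] =
        ((rows ++ [r]).filter (fun q => decide (i < q.length))).map (fun q => pvInt (q.getD i "")) := by
      simp [pvCols]
    rw [hRHS, List.filter_append, List.map_append]
    by_cases hiw : i < pvWidth rows
    · rw [List.getElem_append_left (by simp [hW]; omega)]
      rw [List.getElem_mapIdx]
      have hpc : (pvCols rows)[i]'(by omega) =
          (rows.filter (fun q => decide (i < q.length))).map (fun q => pvInt (q.getD i "")) := by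
        simp [pvCols]
      rw [hpc]
      by_cases hir : i < r.length
      · rw [if_pos ⟨Nat.zero_le _, by omega⟩]
        have : List.filter (fun q => decide (i < q.length)) [r] = [r] := by
          simp only [List.filter_cons, List.filter_nil]
          rw [if_pos (by simpa using hir)]
        rw [this]
        simp
      · rw [if_neg (by omega)]
        have : List.filter (fun q => decide (i < q.length)) [r] = [] := by
          simp only [List.filter_cons, List.filter_nil]
          rw [if_neg (by simpa using hir)]
        rw [this]
        simp
    · have hir : i < r.length := by omega
      have hWr : pvWidth rows ≤ i := by omega
      rw [List.getElem_append_right (by simp [hW]; omega)]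
      have hfil : List.filter (fun q => decide (i < q.length)) rows = [] := by
        rw [List.filter_eq_nil_iff]
        intro q hq
        have := len_le_pvWidth rows q hq
        simp
        omega
      rw [hfil]
      have hfil2 : List.filter (fun q => decide (i < q.length)) [r] = [r] := by
        simp only [List.filter_cons, List.filter_nil]
        rw [if_pos (by simpa using hir)]
      rw [hfil2]
      simp only [List.length_mapIdx, hW, List.getElem_map, List.getElem_drop, List.nil_append,
        List.map_cons, List.map_nil]
      simp only [show pvWidth rows + (i - pvWidth rows) = i from by omega,
        List.getD_eq_getElem r "" hir]

theorem mainA (input : List String) (rows : List (List String)) (params : List String) :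
    input.foldl stepA (pvCols rows, params) =
      (pvCols (input.foldl stepB (rows, params)).1, (input.foldl stepB (rows, params)).2) := by
  induction input generalizing rows params with
  | nil => simp
  | cons line rest ih =>
      rw [List.foldl_cons, List.foldl_cons]
      by_cases h : PySem.Str.isIn "+" line
      · have hA : stepA (pvCols rows, params) line = (pvCols rows, params ++ PySem.Str.split₀ line) := by
          simp only [stepA]
          rw [if_pos h, foldl_snoc_param]
        have hB : stepB (rows, params) line = (rows, params ++ PySem.Str.split₀ line) := by
          simp only [stepB]
          rw [if_pos h]
        rw [hA, hB, ih]
      · have hA : stepA (pvCols rows, params) line = (pvCols (rows ++ [PySem.Str.split₀ line]), params) := by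
          simp only [stepA]
          rw [if_neg h]
          rw [show ((0 : Int)) = ((0 : Nat) : Int) from rfl, enum_fold_eq_innerGo, cols_snoc]
        have hB : stepB (rows, params) line = (rows ++ [PySem.Str.split₀ line], params) := by
          simp only [stepB]
          rw [if_neg h]
        rw [hA, hB, ih]

-- ===== VERDICT =====
theorem parse_spec : Claim_equal_parse := by
  intro input _ _
  unfold Spec_parse parse parse_alt
  have h0 : pvCols [] = [] := by simp [pvCols, pvWidth]
  have := mainA input [] []
  rw [h0] at this
  simp [this]
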